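-- pv_equiv track=rewrite | github.com/satriotsubasa/PowerPlatform-Core | scripts/discover_context.py | filter_paths_under
-- ===== SOURCE A (Python) =====
-- def filter_paths_under(paths: list[str], parent_paths: list[str]) -> list[str]:
--     if not paths or not parent_paths:
--         return []
--     lowered_parents = [normalize_relative_repo_path(parent).lower() for parent in parent_paths]
--     matching = []
--     for path in paths:
--         lowered_path = normalize_relative_repo_path(path).lower()
--         if any(lowered_path.startswith(parent + "/") or lowered_path == parent for parent in lowered_parents):
--             matching.append(path)
--     return matching
--
-- def normalize_relative_repo_path(value: str) -> str:
--     return value.replace("\\", "/").strip("/")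
-- ===== SOURCE B (Python) =====
-- def normalize_relative_repo_path(value: str) -> str:
--     return value.replace("\\", "/").strip("/")
--
--
-- def filter_paths_under(paths: list[str], parent_paths: list[str]) -> list[str]:
--     # Hash-index rewrite: one set of normalized parents, then for each path test
--     # its own component-boundary prefixes against the set (no scan over parents).
--     parents = {normalize_relative_repo_path(p).lower() for p in parent_paths}
--     result = []
--     for path in paths:
--         lp = normalize_relative_repo_path(path).lower()
--         if lp in parents or any(c == "/" and lp[:i] in parents for i, c in enumerate(lp)):
--             result.append(path)
--     return result
-- ===== Notes on version B (the rewrite author's own statement) =====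
-- stated objective: faster
-- what changed: Replaces the inner any-scan over all parents per path by a hash set of normalized parents queried once for the whole path and once per '/'-boundary prefix of the path.
import Mathlib
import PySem

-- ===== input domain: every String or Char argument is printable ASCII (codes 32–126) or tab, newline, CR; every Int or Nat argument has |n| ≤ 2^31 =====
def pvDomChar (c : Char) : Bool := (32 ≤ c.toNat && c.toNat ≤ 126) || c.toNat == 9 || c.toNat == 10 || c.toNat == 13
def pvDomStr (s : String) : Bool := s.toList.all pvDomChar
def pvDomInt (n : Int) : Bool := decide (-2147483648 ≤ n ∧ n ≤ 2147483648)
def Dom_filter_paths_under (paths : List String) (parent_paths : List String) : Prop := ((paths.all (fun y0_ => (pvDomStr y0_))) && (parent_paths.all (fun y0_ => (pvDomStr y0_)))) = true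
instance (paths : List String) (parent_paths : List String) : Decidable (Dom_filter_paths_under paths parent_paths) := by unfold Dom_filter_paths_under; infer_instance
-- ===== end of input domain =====

-- B replaces the per-path scan over all parents by one hash set of normalized parents
-- queried at each '/'-boundary prefix of the path (objective: faster on many parents).

-- ===== PORT A =====
-- normalize_relative_repo_path
def pvNormA (value : String) : String :=
  PySem.Str.stripChars (PySem.Str.replace value "\\" "/") "/"

def filter_paths_under (paths : List String) (parent_paths : List String) : List String :=
  if paths.isEmpty || parent_paths.isEmpty then []
  else
    let lowered_parents := parent_paths.map (fun parent => PySem.Str.lower (pvNormA parent))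
    paths.foldl (fun matching path =>
      let lowered_path := PySem.Str.lower (pvNormA path)
      if lowered_parents.any (fun parent =>
           PySem.Str.startswith lowered_path (parent ++ "/") || lowered_path == parent)
      then matching ++ [path] else matching) []

-- ===== PORT B =====
-- strings handled as their code-point lists (exact for Python str)
def pvNormB (value : List Char) : List Char :=
  PySem.Chars.stripChars (PySem.Chars.replace value ['\\'] ['/']) ['/']

-- 'lp in parents or any(c == "/" and lp[:i] in parents for i, c in enumerate(lp))'
def pvMatchB (parents : PySem.Set (List Char)) (lp : List Char) : Bool :=
  PySem.Set.contains parents lp ||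
    (PySem.List.enumerate lp).any (fun ic =>
      ic.2 == '/' && PySem.Set.contains parents (PySem.Chars.slice lp none (some ic.1)))

def filter_paths_under_alt (paths : List String) (parent_paths : List String) : List String :=
  let parents : PySem.Set (List Char) :=
    PySem.Set.ofList (parent_paths.map (fun p => PySem.Chars.lower (pvNormB p.toList)))
  paths.foldl (fun result path =>
    if pvMatchB parents (PySem.Chars.lower (pvNormB path.toList))
    then result ++ [path] else result) []

-- ===== PRECONDITION & SPEC =====
def Spec_filter_paths_under (paths : List String) (parent_paths : List String) (out : List String) : Prop := out = filter_paths_under_alt paths parent_paths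
instance (paths : List String) (parent_paths : List String) (out : List String) : Decidable (Spec_filter_paths_under paths parent_paths out) := by unfold Spec_filter_paths_under; infer_instance

-- ===== CLAIM (what is proved, stated in full; the proofs are below) =====
def Claim_equal_filter_paths_under : Prop := ∀ (paths : List String) (parent_paths : List String), Dom_filter_paths_under paths parent_paths → Spec_filter_paths_under paths parent_paths (filter_paths_under paths parent_paths)

-- ===== LEMMAS AND PROOFS =====

-- the append-in-a-loop shape of both ports is List.filter
lemma pv_foldl_filter {α : Type} (p : α → Bool) (l : List α) (acc : List α) :
    l.foldl (fun acc x => if p x then acc ++ [x] else acc) acc = acc ++ l.filter p := by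
  induction l generalizing acc with
  | nil => simp
  | cons x xs ih =>
    simp only [List.foldl_cons, ih, List.filter_cons]
    by_cases h : p x <;> simp [h]

-- the two normalizations agree (String side vs list side)
lemma pv_norm_toList (s : String) : (pvNormA s).toList = pvNormB s.toList := by
  simp [pvNormA, pvNormB, PySem.Str.toList_stripChars, PySem.Str.toList_replace]

-- "lp starts with par + '/'" ↔ par is the prefix of lp cut at some '/' position
lemma pv_prefix_slash (lp par : List Char) :
    par ++ ['/'] <+: lp ↔ ∃ k, ∃ _ : k < lp.length, lp[k] = '/' ∧ lp.take k = par := by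
  constructor
  · rintro ⟨t, ht⟩
    subst ht
    refine ⟨par.length, by simp, ?_, ?_⟩
    · simp
    · simp
  · rintro ⟨k, hk, hget, htake⟩
    have h1 : lp.take (k + 1) = par ++ ['/'] := by
      rw [List.take_add_one, htake, List.getElem?_eq_getElem hk, hget]
      rfl
    exact h1 ▸ List.take_prefix _ _

-- A's any-over-parents test equals B's prefix-set test
lemma pv_match_eq (lp : List Char) (L : List (List Char)) :
    L.any (fun par => PySem.Chars.startswith lp (par ++ ['/']) || lp == par)
      = pvMatchB (PySem.Set.ofList L) lp := by
  rw [Bool.eq_iff_iff]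
  simp only [List.any_eq_true, Bool.or_eq_true, Bool.and_eq_true, beq_iff_eq, pvMatchB,
    PySem.Set.contains_iff, PySem.Set.mem_ofList, PySem.Chars.startswith_iff,
    PySem.List.mem_enumerate_iff]
  constructor
  · rintro ⟨par, hmem, hsw | heq⟩
    · rcases (pv_prefix_slash lp par).mp hsw with ⟨k, hk, hget, htake⟩
      refine Or.inr ⟨(↑k, '/'), ⟨k, hk, by simp [hget]⟩, rfl, ?_⟩
      rw [PySem.Chars.slice_eq_listSlice, PySem.List.slice_to _ (by positivity)]
      simpa [htake] using hmem
    · exact Or.inl (heq ▸ hmem)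
  · rintro (hmem | ⟨ic, ⟨k, hk, hic⟩, hslash, hmem⟩)
    · exact ⟨lp, hmem, Or.inr rfl⟩
    · subst hic
      simp only at hslash hmem
      rw [PySem.Chars.slice_eq_listSlice, PySem.List.slice_to _ (by positivity)] at hmem
      simp only [zero_add, Int.toNat_natCast] at hmem
      refine ⟨lp.take k, hmem, Or.inl ?_⟩
      exact (pv_prefix_slash lp _).mpr ⟨k, hk, hslash, rfl⟩

-- per-path string test bridged to the list side
lemma pv_point (lp q : String) :
    (PySem.Str.startswith lp (q ++ "/") || lp == q)
      = (PySem.Chars.startswith lp.toList (q.toList ++ ['/']) || lp.toList == q.toList) := by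
  have h1 : (q ++ "/").toList = q.toList ++ ['/'] := by simp
  have h2 : (lp == q) = (lp.toList == q.toList) := by
    rw [Bool.eq_iff_iff, beq_iff_eq, beq_iff_eq, String.toList_inj]
  rw [PySem.Str.startswith_eq, h1, h2]

-- per-path predicates of the two ports agree
lemma pv_pred_eq (path : String) (parent_paths : List String) :
    ((parent_paths.map (fun p => PySem.Str.lower (pvNormA p))).any (fun parent =>
        PySem.Str.startswith (PySem.Str.lower (pvNormA path)) (parent ++ "/")
          || PySem.Str.lower (pvNormA path) == parent))
      = pvMatchB (PySem.Set.ofList (parent_paths.map (fun p => PySem.Chars.lower (pvNormB p.toList))))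
          (PySem.Chars.lower (pvNormB path.toList)) := by
  have hlp : (PySem.Str.lower (pvNormA path)).toList = PySem.Chars.lower (pvNormB path.toList) := by
    simp [PySem.Str.toList_lower, pv_norm_toList]
  have hmap : parent_paths.map (fun p => PySem.Chars.lower (pvNormB p.toList))
      = (parent_paths.map (fun p => PySem.Str.lower (pvNormA p))).map String.toList := by
    simp [List.map_map, Function.comp_def, PySem.Str.toList_lower, pv_norm_toList]
  rw [hmap, ← hlp, ← pv_match_eq]
  simp only [List.any_map]
  apply PySem.List.any_congr_mem
  intro parent _
  simp only [Function.comp_apply]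
  exact pv_point (PySem.Str.lower (pvNormA path)) (PySem.Str.lower (pvNormA parent))

-- ===== VERDICT (by name: the statement is the Claim_ definition above) =====
theorem filter_paths_under_spec : Claim_equal_filter_paths_under := by
  intro paths parent_paths _
  show filter_paths_under paths parent_paths = filter_paths_under_alt paths parent_paths
  simp only [filter_paths_under, filter_paths_under_alt, pv_foldl_filter, List.nil_append]
  split
  · rename_i h
    rcases Bool.or_eq_true_iff.mp h with h' | h'
    · rw [List.isEmpty_iff.mp h']
      simp
    · rw [List.isEmpty_iff.mp h']
      symm
      rw [List.filter_eq_nil_iff]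
      intro path _
      simp [pvMatchB, PySem.Set.ofList, PySem.Set.contains]
  · apply List.filter_congr
    intro path _
    exact pv_pred_eq path parent_paths
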